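-- pv_equiv track=rewrite | github.com/manwar/perlweeklychallenge-club | challenge-323/steven-wilson/python/ch-1.py | increment_decrement
-- ===== SOURCE A (Python) =====
-- def increment_decrement(operations):
--     """ Given a list of operations, return the final value after performing the
--     given operations in order. The initial value is always 0.
--
--     >>> increment_decrement(["--x", "x++", "x++"])
--     1
--     >>> increment_decrement(["x++", "++x", "x++"])
--     3
--     >>> increment_decrement(["x++", "++x", "--x", "x--"])
--     0
--     """
--     increment = {"++x", "x++"}
--     decrement = {"--x", "x--"}
--     value = 0
--     for op in operations:
--         if op in increment:
--             value += 1
--         elif op in decrement: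
--             value -= 1
--     return value
-- ===== SOURCE B (Python) =====
-- def increment_decrement(operations):
--     return (operations.count("++x") + operations.count("x++")
--             - operations.count("--x") - operations.count("x--"))
-- ===== Notes on version B (the rewrite author's own statement) =====
-- stated objective: idiomatic
-- what changed: Replaces the single accumulating loop with set-membership branches by a closed combination of four list.count scans (count of increment ops minus count of decrement ops), with no explicit loop or accumulator.
import Mathlib
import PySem

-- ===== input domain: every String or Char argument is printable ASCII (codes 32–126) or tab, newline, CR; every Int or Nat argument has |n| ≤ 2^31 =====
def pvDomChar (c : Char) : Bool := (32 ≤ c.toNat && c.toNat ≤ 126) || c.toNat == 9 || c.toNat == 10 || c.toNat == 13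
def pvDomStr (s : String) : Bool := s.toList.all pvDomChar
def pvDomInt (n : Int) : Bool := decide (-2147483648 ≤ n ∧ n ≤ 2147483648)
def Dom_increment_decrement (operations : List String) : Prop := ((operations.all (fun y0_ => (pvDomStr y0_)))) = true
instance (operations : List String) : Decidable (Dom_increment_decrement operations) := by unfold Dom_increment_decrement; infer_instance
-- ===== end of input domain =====

-- ===== PORT A =====
-- Header: B computes the result as a closed combination of four exact-match count scans
-- instead of A's single accumulating loop with set-membership branches (objective: idiomatic).
def increment_decrement (operations : List String) : Int :=
  let increment : PySem.Set String := PySem.Set.ofList ["++x", "x++"]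
  let decrement : PySem.Set String := PySem.Set.ofList ["--x", "x--"]
  operations.foldl (fun value op =>
    if PySem.Set.contains increment op then value + 1
    else if PySem.Set.contains decrement op then value - 1
    else value) 0

-- ===== PORT B =====
def increment_decrement_alt (operations : List String) : Int :=
  (PySem.List.count operations "++x" : Int) + (PySem.List.count operations "x++" : Int)
    - (PySem.List.count operations "--x" : Int) - (PySem.List.count operations "x--" : Int)

-- ===== PRECONDITION & SPEC =====
def Spec_increment_decrement (operations : List String) (out : Int) : Prop := out = increment_decrement_alt operations
instance (operations : List String) (out : Int) : Decidable (Spec_increment_decrement operations out) := by unfold Spec_increment_decrement; infer_instance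

-- ===== CLAIM (what is proved, stated in full; the proofs are below) =====
def Claim_equal_increment_decrement : Prop := ∀ (operations : List String), Dom_increment_decrement operations → Spec_increment_decrement operations (increment_decrement operations)

-- ===== LEMMAS AND PROOFS =====

-- ===== VERDICT (by name: the statement is the Claim_ definition above) =====
lemma id_foldl_shift (ops : List String) (v : Int) :
    ops.foldl (fun value op =>
      if PySem.Set.contains (PySem.Set.ofList ["++x", "x++"]) op then value + 1
      else if PySem.Set.contains (PySem.Set.ofList ["--x", "x--"]) op then value - 1
      else value) v
    = v + (PySem.List.count ops "++x" : Int) + (PySem.List.count ops "x++" : Int)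
        - (PySem.List.count ops "--x" : Int) - (PySem.List.count ops "x--" : Int) := by
  induction ops generalizing v with
  | nil => simp [PySem.List.count]
  | cons op rest ih =>
    simp only [List.foldl_cons, ih]
    by_cases h1 : op = "++x" <;> by_cases h2 : op = "x++" <;>
      by_cases h3 : op = "--x" <;> by_cases h4 : op = "x--" <;>
      simp_all [PySem.List.count_eq, PySem.Set.contains] <;> ring

theorem increment_decrement_spec : Claim_equal_increment_decrement := by
  intro ops _
  unfold Spec_increment_decrement increment_decrement increment_decrement_alt
  simp only [id_foldl_shift]
  ring
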